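-- pv_equiv track=rewrite | github.com/Tarunchintakunta/Zta-project | lab.py | trim_to_json_bounds
-- ===== SOURCE A (Python) =====
-- def trim_to_json_bounds(text, first_word, last_word):
--     words = text.split()
--     try:
--         start = next(i for i, w in enumerate(words) if w.lower() == first_word.lower())
--     except StopIteration:
--         start = 0
--
--     try:
--         end = len(words) - next(i for i, w in enumerate(reversed(words)) if w.lower() == last_word.lower())
--     except StopIteration:
--         end = len(words)
--
--     return ' '.join(words[start:end])
-- ===== SOURCE B (Python) =====
-- def trim_to_json_bounds(text, first_word, last_word):
--     words = text.split()
--     fl = first_word.lower()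
--     ll = last_word.lower()
--     start = None
--     end = len(words)
--     for i, w in enumerate(words):
--         lw = w.lower()
--         if start is None and lw == fl:
--             start = i
--         if lw == ll:
--             end = i + 1
--     return ' '.join(words[(0 if start is None else start):end])
-- ===== Notes on version B (the rewrite author's own statement) =====
-- stated objective: alternative
-- what changed: A makes two independent scans (a forward next() for the first bound and a next() over reversed(words) for the last bound); B computes both bounds in one forward pass over enumerate(words), keeping the first match for start and last-match+1 for end, with the target words lowercased once.
import Mathlib
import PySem

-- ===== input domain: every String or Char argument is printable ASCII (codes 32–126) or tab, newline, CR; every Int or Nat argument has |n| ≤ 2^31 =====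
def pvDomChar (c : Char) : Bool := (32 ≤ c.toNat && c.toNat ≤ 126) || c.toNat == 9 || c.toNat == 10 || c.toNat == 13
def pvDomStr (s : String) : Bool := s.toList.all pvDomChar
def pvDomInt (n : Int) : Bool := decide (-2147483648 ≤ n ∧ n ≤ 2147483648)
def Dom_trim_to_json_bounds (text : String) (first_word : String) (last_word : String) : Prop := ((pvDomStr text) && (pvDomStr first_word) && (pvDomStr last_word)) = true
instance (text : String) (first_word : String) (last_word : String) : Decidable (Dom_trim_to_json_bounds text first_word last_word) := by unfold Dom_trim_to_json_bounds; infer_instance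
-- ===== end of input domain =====

-- B replaces A's forward scan + reverse scan with one single forward pass maintaining both bounds (alternative decomposition, same cost).

-- ===== PORT A =====
-- transliteration of `next(i for i, w in enumerate(ws) if w.lower() == target.lower())` (none = StopIteration)
def pvNextIdx (target : String) : List (Int × String) → Option Int
  | [] => none
  | (i, w) :: rest =>
      if PySem.Str.lower w = PySem.Str.lower target then some i else pvNextIdx target rest

def trim_to_json_bounds (text : String) (first_word : String) (last_word : String) : String :=
  let words := PySem.Str.split₀ text
  let start : Int :=
    match pvNextIdx first_word (PySem.List.enumerate words) with
    | some i => i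
    | none => 0
  let stop : Int :=
    match pvNextIdx last_word (PySem.List.enumerate words.reverse) with
    | some i => (words.length : Int) - i
    | none => (words.length : Int)
  PySem.Str.join " " (PySem.List.slice words (some start) (some stop))

-- ===== PORT B =====
-- the single forward pass of Source B: state = (start : Option Int, end : Int)
def pvStep (fl ll : String) (st : Option Int × Int) (iw : Int × String) : Option Int × Int :=
  let lw := PySem.Str.lower iw.2
  let st := if st.1 = none ∧ lw = fl then (some iw.1, st.2) else st
  if lw = ll then (st.1, iw.1 + 1) else st

def trim_to_json_bounds_alt (text : String) (first_word : String) (last_word : String) : String :=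
  let words := PySem.Str.split₀ text
  let fl := PySem.Str.lower first_word
  let ll := PySem.Str.lower last_word
  let st := (PySem.List.enumerate words).foldl (pvStep fl ll) (none, (words.length : Int))
  PySem.Str.join " " (PySem.List.slice words (some ((st.1).getD 0)) (some st.2))

-- ===== PRECONDITION & SPEC =====
def Spec_trim_to_json_bounds (text : String) (first_word : String) (last_word : String) (out : String) : Prop := out = trim_to_json_bounds_alt text first_word last_word
instance (text : String) (first_word : String) (last_word : String) (out : String) : Decidable (Spec_trim_to_json_bounds text first_word last_word out) := by unfold Spec_trim_to_json_bounds; infer_instance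

-- ===== CLAIM (what is proved, stated in full; the proofs are below) =====
def Claim_equal_trim_to_json_bounds : Prop := ∀ (text : String) (first_word : String) (last_word : String), Dom_trim_to_json_bounds text first_word last_word → Spec_trim_to_json_bounds text first_word last_word (trim_to_json_bounds text first_word last_word)

-- ===== LEMMAS AND PROOFS =====

-- index (relative, as Nat) of the FIRST word whose lower equals t
def pvFirst (t : String) : List String → Option Nat
  | [] => none
  | w :: ws => if PySem.Str.lower w = t then some 0 else (pvFirst t ws).map (· + 1)

-- index (relative, as Nat) of the LAST word whose lower equals t
def pvLast (t : String) : List String → Option Nat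
  | [] => none
  | w :: ws =>
      match pvLast t ws with
      | some j => some (j + 1)
      | none => if PySem.Str.lower w = t then some 0 else none

theorem pvNextIdx_enumerate (t : String) (ws : List String) (s : Int) :
    pvNextIdx t (PySem.List.enumerate ws s)
      = (pvFirst (PySem.Str.lower t) ws).map (fun k => s + (k : Int)) := by
  induction ws generalizing s with
  | nil => simp [pvNextIdx, pvFirst, PySem.List.enumerate_nil]
  | cons w ws ih =>
      simp only [PySem.List.enumerate_cons, pvNextIdx, pvFirst]
      split_ifs with h
      · simp
      · rw [ih]
        cases pvFirst (PySem.Str.lower t) ws <;> simp <;> ring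

theorem pvFirst_append_single (t : String) (ws : List String) (w : String) :
    pvFirst t (ws ++ [w])
      = match pvFirst t ws with
        | some k => some k
        | none => if PySem.Str.lower w = t then some ws.length else none := by
  induction ws with
  | nil => by_cases h : PySem.Str.lower w = t <;> simp [pvFirst, pvFirst.eq_def, h]
  | cons x xs ih =>
      simp only [List.cons_append, pvFirst, ih]
      by_cases h : PySem.Str.lower x = t
      · simp [h]
      · simp only [h, if_false]
        cases pvFirst t xs with
        | some k => simp
        | none => by_cases h2 : PySem.Str.lower w = t <;> simp [h2]

-- bound: any index returned by pvLast is < length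
theorem pvLast_lt (t : String) (ws : List String) (j : Nat) (h : pvLast t ws = some j) :
    j < ws.length := by
  induction ws generalizing j with
  | nil => simp [pvLast] at h
  | cons w ws ih =>
      simp only [pvLast] at h
      cases h2 : pvLast t ws with
      | some k =>
          rw [h2] at h; simp at h
          have := ih k h2
          simp only [List.length_cons]
          omega
      | none => rw [h2] at h; split_ifs at h <;> (simp_all; omega)

theorem pvFirst_reverse (t : String) (ws : List String) :
    pvFirst t ws.reverse
      = (pvLast t ws).map (fun j => ws.length - 1 - j) := by
  induction ws with
  | nil => simp [pvFirst, pvLast]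
  | cons w ws ih =>
      simp only [List.reverse_cons, pvFirst_append_single, ih, pvLast]
      cases h : pvLast t ws with
      | some j =>
          have hj := pvLast_lt t ws j h
          simp
          omega
      | none =>
          simp only [Option.map_none]
          split_ifs with hw <;> simp [List.length_reverse]

theorem pvFoldl_step (fl ll : String) (ws : List String) (s : Int) (o : Option Int) (e : Int) :
    (PySem.List.enumerate ws s).foldl (pvStep fl ll) (o, e)
      = ( (match o with
           | some x => some x
           | none => (pvFirst fl ws).map (fun k => s + (k : Int))),
          (match pvLast ll ws with
           | some j => s + (j : Int) + 1
           | none => e) ) := by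
  induction ws generalizing s o e with
  | nil => cases o <;> simp [PySem.List.enumerate_nil, pvFirst, pvLast]
  | cons w ws ih =>
      simp only [PySem.List.enumerate_cons, List.foldl_cons, ih]
      simp only [pvStep, pvFirst, pvLast]
      cases o with
      | some x =>
          simp only [reduceCtorEq, false_and, if_false]
          split_ifs with h2 <;>
            cases h3 : pvLast ll ws <;> simp_all <;> omega
      | none =>
          by_cases h1 : PySem.Str.lower w = fl <;>
          by_cases h2 : PySem.Str.lower w = ll <;>
            cases h3 : pvLast ll ws <;>
            cases h4 : pvFirst fl ws <;>
              simp_all <;> omega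

-- ===== VERDICT (by name: the statement is the Claim_ definition above) =====
theorem trim_to_json_bounds_spec : Claim_equal_trim_to_json_bounds := by
  intro text first_word last_word _
  show _ = _
  unfold trim_to_json_bounds trim_to_json_bounds_alt
  set ws := PySem.Str.split₀ text with hws
  clear_value ws
  simp only [pvFoldl_step, pvNextIdx_enumerate, pvFirst_reverse]
  congr 2
  · -- start components agree
    cases h : pvFirst (PySem.Str.lower first_word) ws <;> simp
  · -- stop components agree
    cases h : pvLast (PySem.Str.lower last_word) ws with
    | some j =>
        have hj := pvLast_lt _ _ _ h
        simp
        have e : (ws.length:Int) - ((ws.length - 1 - j : Nat):Int) = (j:Int) + 1 := by omega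
        exact e
    | none => simp
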